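-- pv_equiv track=rewrite | github.com/InfDev00/National-Language-Processing | cs224n assignment1/count_based_word_vector.py | distinct_words
-- ===== SOURCE A (Python) =====
-- def distinct_words(corpus):
--     """ Determine a list of distinct words for the corpus.
--         Params:
--             corpus (list of list of strings): corpus of documents
--         Return:
--             corpus_words (list of strings): sorted list of distinct words across the corpus
--             num_corpus_words (integer): number of distinct words across the corpus
--     """
--     corpus_words = []
--     num_corpus_words = -1
--
--     # ------------------
--     # Write your implementation here.
--     corpus_set = set()
--     for word in corpus:
--       corpus_set.update(word)
--
--     corpus_words = sorted(list(corpus_set))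
--     num_corpus_words = len(corpus_words)
--     # ------------------
--
--     return corpus_words, num_corpus_words
-- ===== SOURCE B (Python) =====
-- def distinct_words(corpus):
--     words = []
--     for doc in corpus:
--         words.extend(doc)
--     words.sort()
--     corpus_words = []
--     prev = None
--     for w in words:
--         if w != prev:
--             corpus_words.append(w)
--             prev = w
--     return corpus_words, len(corpus_words)
-- ===== Notes on version B (the rewrite author's own statement) =====
-- stated objective: alternative
-- what changed: Instead of accumulating words into a set and sorting the distinct elements, B flattens the corpus into one list with duplicates, sorts it, and deduplicates in a single adjacent-scan pass.
import Mathlib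
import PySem

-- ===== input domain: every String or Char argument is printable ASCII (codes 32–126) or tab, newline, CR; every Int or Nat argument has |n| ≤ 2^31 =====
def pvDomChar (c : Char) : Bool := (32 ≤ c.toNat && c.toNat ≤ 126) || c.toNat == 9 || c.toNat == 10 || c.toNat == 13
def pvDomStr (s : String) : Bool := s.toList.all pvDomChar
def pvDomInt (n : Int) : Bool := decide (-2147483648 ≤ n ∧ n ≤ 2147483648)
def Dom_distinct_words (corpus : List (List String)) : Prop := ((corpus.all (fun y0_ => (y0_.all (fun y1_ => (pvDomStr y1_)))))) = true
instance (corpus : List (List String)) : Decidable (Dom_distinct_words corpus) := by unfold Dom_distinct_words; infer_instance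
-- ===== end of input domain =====

-- B flattens the corpus into one list with duplicates, sorts it, and deduplicates in a single
-- adjacent scan, instead of A's set accumulation followed by sorting the distinct elements.


-- ===== PORT A =====
-- corpus_set = set(); for word in corpus: corpus_set.update(word); sorted(list(corpus_set))
def distinct_words (corpus : List (List String)) : List String × Int :=
  let corpus_set := corpus.foldl (fun s word => PySem.Set.update s word) PySem.Set.empty
  let corpus_words := PySem.List.sorted corpus_set (fun x => x) false
  (corpus_words, (corpus_words.length : Int))

-- ===== PORT B =====
-- flatten, sort the full list, then one adjacent-dedup scan tracking the previous kept word
def distinct_words_alt (corpus : List (List String)) : List String × Int :=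
  let words := corpus.foldl (fun acc doc => acc ++ doc) []
  let sortedWords := PySem.List.sorted words (fun x => x) false
  let st := sortedWords.foldl
      (fun (st : List String × Option String) w =>
        if st.2 ≠ some w then (st.1 ++ [w], some w) else st)
      ([], none)
  (st.1, (st.1.length : Int))

-- ===== PRECONDITION & SPEC =====
def Spec_distinct_words (corpus : List (List String)) (out : List String × Int) : Prop := out = distinct_words_alt corpus
instance (corpus : List (List String)) (out : List String × Int) : Decidable (Spec_distinct_words corpus out) := by unfold Spec_distinct_words; infer_instance

-- ===== CLAIM (what is proved, stated in full; the proofs are below) =====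
def Claim_equal_distinct_words : Prop := ∀ (corpus : List (List String)), Dom_distinct_words corpus → Spec_distinct_words corpus (distinct_words corpus)

-- ===== LEMMAS AND PROOFS =====

-- recursive description of B's dedup scan (the kept suffix, given the previous kept word)
def dwScan : Option String → List String → List String
  | _, [] => []
  | prev, w :: ws => if prev = some w then dwScan prev ws else w :: dwScan (some w) ws

theorem dwScan_foldl (ws : List String) : ∀ (out : List String) (prev : Option String),
    (ws.foldl
      (fun (st : List String × Option String) w =>
        if st.2 ≠ some w then (st.1 ++ [w], some w) else st)
      (out, prev)).1 = out ++ dwScan prev ws := by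
  induction ws with
  | nil => intro out prev; simp [dwScan]
  | cons w ws ih =>
    intro out prev
    rw [List.foldl_cons]
    simp only [dwScan]
    by_cases h : prev = some w
    · rw [if_pos h, if_neg (by simp [h])]
      exact ih out prev
    · rw [if_neg h, if_pos (by simp [Ne, h])]
      rw [ih (out ++ [w]) (some w), List.append_assoc]
      rfl

theorem dwScan_mem (ws : List String) : ∀ (prev : Option String),
    ws.Pairwise (· ≤ ·) → (∀ p, prev = some p → ∀ w ∈ ws, p ≤ w) →
    ∀ x, x ∈ dwScan prev ws ↔ (x ∈ ws ∧ prev ≠ some x) := by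
  induction ws with
  | nil => intro prev _ _ x; simp [dwScan]
  | cons w ws ih =>
    intro prev hpw hlow x
    rw [List.pairwise_cons] at hpw
    simp only [dwScan]
    by_cases h : prev = some w
    · rw [if_pos h]
      have hlow' : ∀ p, prev = some p → ∀ r ∈ ws, p ≤ r := by
        intro p hp r hr
        rw [h] at hp; cases Option.some.inj hp; exact hpw.1 r hr
      rw [ih prev hpw.2 hlow' x]
      constructor
      · rintro ⟨hx, hne⟩; exact ⟨List.mem_cons_of_mem _ hx, hne⟩
      · rintro ⟨hx, hne⟩
        rcases List.mem_cons.mp hx with rfl | hx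
        · exact absurd h hne
        · exact ⟨hx, hne⟩
    · rw [if_neg h]
      have hlow' : ∀ p, some w = some p → ∀ r ∈ ws, p ≤ r := by
        rintro p hp r hr; cases Option.some.inj hp; exact hpw.1 r hr
      have ihm := ih (some w) hpw.2 hlow'
      constructor
      · intro hx
        rcases List.mem_cons.mp hx with rfl | hx
        · exact ⟨List.mem_cons_self, h⟩
        · obtain ⟨hx', hne⟩ := (ihm x).mp hx
          refine ⟨List.mem_cons_of_mem _ hx', ?_⟩
          intro hpx
          -- prev = some x, x ∈ ws, w ≠ x; but x ≤ w (hlow) and w ≤ x (pairwise) force x = w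
          have h1 : x ≤ w := hlow x hpx w List.mem_cons_self
          have h2 : w ≤ x := hpw.1 x hx'
          exact hne (by rw [le_antisymm h1 h2])
      · rintro ⟨hx, hne⟩
        by_cases hxw : x = w
        · subst hxw; exact List.mem_cons_self
        · rcases List.mem_cons.mp hx with rfl | hx
          · exact absurd rfl hxw
          · exact List.mem_cons_of_mem _
              ((ihm x).mpr ⟨hx, fun he => hxw (Option.some.inj he).symm⟩)

theorem dwScan_pairwise (ws : List String) : ∀ (prev : Option String),
    ws.Pairwise (· ≤ ·) → (∀ p, prev = some p → ∀ w ∈ ws, p ≤ w) →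
    (dwScan prev ws).Pairwise (· < ·) := by
  induction ws with
  | nil => intro prev _ _; simp [dwScan]
  | cons w ws ih =>
    intro prev hpw hlow
    rw [List.pairwise_cons] at hpw
    simp only [dwScan]
    by_cases h : prev = some w
    · rw [if_pos h]
      exact ih prev hpw.2 (by intro p hp r hr; rw [h] at hp; cases Option.some.inj hp; exact hpw.1 r hr)
    · rw [if_neg h]
      have hlow' : ∀ p, some w = some p → ∀ r ∈ ws, p ≤ r := by
        rintro p hp r hr; cases Option.some.inj hp; exact hpw.1 r hr
      refine List.pairwise_cons.mpr ⟨?_, ih (some w) hpw.2 hlow'⟩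
      intro y hy
      obtain ⟨hy', hne⟩ := (dwScan_mem ws (some w) hpw.2 hlow' y).mp hy
      exact lt_of_le_of_ne (hpw.1 y hy') (by intro he; exact hne (by rw [he]))

-- A's accumulated set is set(flatten(corpus))
theorem dwSet_eq (corpus : List (List String)) :
    corpus.foldl (fun s word => PySem.Set.update s word) PySem.Set.empty
      = PySem.Set.ofList (corpus.foldl (fun acc doc => acc ++ doc) []) := by
  rw [PySem.List.foldl_append_eq_flatMap (fun d => d) corpus []]
  show corpus.foldl (fun s word => PySem.Set.update s word) PySem.Set.empty
      = PySem.Set.ofList (corpus.flatMap (fun d => d))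
  have key : ∀ (cs : List (List String)) (s : PySem.Set String),
      cs.foldl (fun s word => PySem.Set.update s word) s
        = (cs.flatMap (fun d => d)).foldl PySem.Set.add s := by
    intro cs
    induction cs with
    | nil => intro s; simp
    | cons d cs ih =>
      intro s
      simp only [List.foldl_cons, List.flatMap_cons, List.foldl_append]
      exact ih _
  rw [key, PySem.Set.ofList]

-- sorting the distinct elements = adjacent-dedup of the sorted full list
theorem dwMain (flat : List String) :
    PySem.List.sorted (PySem.Set.ofList flat) (fun x => x) false
      = dwScan none (PySem.List.sorted flat (fun x => x) false) := by
  have hpw : (PySem.List.sorted flat (fun x => x) false).Pairwise (· ≤ ·) :=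
    PySem.List.sorted_pairwise flat (fun x => x)
  have hlow : ∀ p : String, (none : Option String) = some p →
      ∀ w ∈ PySem.List.sorted flat (fun x => x) false, p ≤ w := by rintro p ⟨⟩
  have hpair := dwScan_pairwise _ none hpw hlow
  have hmem := dwScan_mem _ none hpw hlow
  refine PySem.List.sorted_eq_of_perm_of_pairwise_lt _ _ _ ?_ hpair
  apply List.perm_of_nodup_nodup_toFinset_eq
  · exact hpair.imp (fun h => ne_of_lt h)
  · exact PySem.Set.nodup_ofList flat
  · ext x
    rw [List.mem_toFinset, List.mem_toFinset, hmem x, PySem.Set.mem_ofList,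
      PySem.List.mem_sorted flat (fun x => x) false x]
    simp

-- ===== VERDICT (by name: the statement is the Claim_ definition above) =====
theorem distinct_words_spec : Claim_equal_distinct_words := by
  intro corpus _
  unfold Spec_distinct_words distinct_words distinct_words_alt
  simp only [dwSet_eq corpus, dwMain, dwScan_foldl, List.nil_append]
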